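-- pv_equiv track=rewrite | github.com/mikekozlov/cv-search-poc | src/cv_search/normalize.py | extract_by_lexicon
-- ===== SOURCE A (Python) =====
-- from typing import Dict, List, Iterable, Set
--
-- def _norm(s: str) -> str:
--     return " ".join(s.lower().strip().split())
--
-- def extract_by_lexicon(text: str, inv_index: Dict[str, str]) -> List[str]:
--     """
--     Greedy substring match using the inverse index (normalized).
--     Returns unique canonicals in insertion order.
--     """
--     t = _norm(text)
--     seen: Set[str] = set()
--     out: List[str] = []
--     # Match longer phrases first
--     keys = sorted(inv_index.keys(), key=len, reverse=True)
--     for k in keys: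
--         if k and k in t:
--             canon = inv_index[k]
--             if canon not in seen:
--                 seen.add(canon)
--                 out.append(canon)
--     return out
-- ===== SOURCE B (Python) =====
-- def extract_by_lexicon(text, inv_index):
--     t = " ".join(text.lower().strip().split())
--     # bucket the (key, canonical) pairs by key length, insertion order kept
--     by_len = {}
--     for k, v in inv_index.items():
--         if k:
--             by_len.setdefault(len(k), []).append((k, v))
--     out = []
--     seen = set()
--     # walk lengths from longest to shortest; match a whole length class at once
--     # against the set of all substrings of t of that length
--     for L in sorted(by_len, reverse=True):
--         subs = {t[i:i + L] for i in range(len(t) - L + 1)}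
--         for k, v in by_len[L]:
--             if k in subs and v not in seen:
--                 seen.add(v)
--                 out.append(v)
--     return out
-- ===== Notes on version B (the rewrite author's own statement) =====
-- stated objective: faster
-- what changed: B replaces A's per-key substring scan with a length-class algorithm: it buckets (key, canonical) pairs by key length in one pass, walks the distinct lengths in descending order (no comparison sort of all keys), and matches each whole class at once by membership in the set of all substrings of t of that length, deduplicating as it emits.
import Mathlib
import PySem

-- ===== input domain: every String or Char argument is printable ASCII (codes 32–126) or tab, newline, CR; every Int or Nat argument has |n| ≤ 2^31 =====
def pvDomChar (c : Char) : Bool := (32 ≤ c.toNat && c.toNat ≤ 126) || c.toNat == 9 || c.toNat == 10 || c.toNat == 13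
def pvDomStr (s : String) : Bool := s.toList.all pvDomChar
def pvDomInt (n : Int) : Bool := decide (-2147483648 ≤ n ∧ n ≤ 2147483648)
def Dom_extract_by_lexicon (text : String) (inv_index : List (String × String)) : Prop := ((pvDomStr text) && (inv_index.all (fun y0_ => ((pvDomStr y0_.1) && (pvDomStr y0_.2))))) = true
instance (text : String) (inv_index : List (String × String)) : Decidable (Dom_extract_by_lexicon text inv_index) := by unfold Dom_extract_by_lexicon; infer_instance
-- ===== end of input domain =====

-- B replaces A's per-key "k in t" scan over all length-sorted keys by a length-class algorithm:
-- bucket the pairs by key length, walk the distinct lengths descending, and match each whole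
-- class at once against the set of all substrings of t of that length (objective: faster).

-- ===== PORT A =====
-- _norm(s) = " ".join(s.lower().strip().split())
def pvNorm (s : String) : String :=
  PySem.Str.join " " (PySem.Str.split₀ (PySem.Str.strip (PySem.Str.lower s)))

def extract_by_lexicon (text : String) (inv_index : List (String × String)) : List String :=
  let t := pvNorm text
  let d := PySem.Dict.ofList inv_index
  -- keys = sorted(inv_index.keys(), key=len, reverse=True)
  let keys := PySem.List.sorted d.keys (fun k => PySem.Str.len k) true
  -- for k in keys: if k and k in t: canon = inv_index[k]; if canon not in seen: seen.add(canon); out.append(canon)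
  -- (k ranges over d's own keys, so inv_index[k] can never raise KeyError; ported as getD with an unused default)
  let res := keys.foldl (fun (acc : PySem.Set String × List String) k =>
    if (!(k == "") && PySem.Str.isIn k t) = true then
      let canon := d.getD k ""
      if acc.1.contains canon then acc else (PySem.Set.add acc.1 canon, acc.2 ++ [canon])
    else acc) (PySem.Set.empty, [])
  res.2

-- ===== PORT B =====
def extract_by_lexicon_alt (text : String) (inv_index : List (String × String)) : List String :=
  let t := PySem.Str.join " " (PySem.Str.split₀ (PySem.Str.strip (PySem.Str.lower text)))
  -- by_len = {}; for k, v in inv_index.items(): if k: by_len.setdefault(len(k), []).append((k, v))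
  let by_len := (PySem.Dict.ofList inv_index).items.foldl
    (fun (bl : PySem.Dict Int (List (String × String))) kv =>
      if kv.1 == "" then bl
      else bl.modify (PySem.Str.len kv.1) [] (· ++ [kv]))
    PySem.Dict.empty
  -- for L in sorted(by_len, reverse=True): subs = {t[i:i+L] for i in range(len(t)-L+1)}; inner loop
  let res := (PySem.List.sorted by_len.keys (fun L => L) true).foldl
    (fun (acc : PySem.Set String × List String) L =>
      let subs := PySem.Set.ofList ((PySem.List.pyRange 0 (PySem.Str.len t - L + 1)).map
        (fun i => PySem.Str.slice t (some i) (some (i + L))))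
      (by_len.getD L []).foldl
        (fun (acc : PySem.Set String × List String) kv =>
          if (subs.contains kv.1 && !(acc.1.contains kv.2)) = true
          then (PySem.Set.add acc.1 kv.2, acc.2 ++ [kv.2]) else acc) acc)
    (PySem.Set.empty, [])
  res.2

-- ===== PRECONDITION & SPEC =====
def Spec_extract_by_lexicon (text : String) (inv_index : List (String × String)) (out : List String) : Prop := out = extract_by_lexicon_alt text inv_index
instance (text : String) (inv_index : List (String × String)) (out : List String) : Decidable (Spec_extract_by_lexicon text inv_index out) := by unfold Spec_extract_by_lexicon; infer_instance

-- ===== CLAIM (what is proved, stated in full; the proofs are below) =====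
def Claim_equal_extract_by_lexicon : Prop := ∀ (text : String) (inv_index : List (String × String)), Dom_extract_by_lexicon text inv_index → Spec_extract_by_lexicon text inv_index (extract_by_lexicon text inv_index)

-- ===== LEMMAS AND PROOFS =====

-- the matched-pair predicate and the key-length key, over the normalized text t
def pvP (t : String) (kv : String × String) : Bool := !(kv.1 == "") && PySem.Str.isIn kv.1 t

def pvKeyLen (kv : String × String) : Int := PySem.Str.len kv.1

-- common normal form both programs are reduced to: ordered dedup of the canonicals of the
-- matched pairs, in stable length-descending order
def pvN (t : String) (inv_index : List (String × String)) : List String :=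
  PySem.Set.update []
    ((PySem.List.sorted ((PySem.Dict.ofList inv_index).items.filter (pvP t)) pvKeyLen true).map (·.2))

-- A's seen/out loop over a list l: the seen set and the out list stay EQUAL, and the result is
-- the ordered dedup (Set.update) of the matched canonicals.
theorem pv_foldl_seen (p : String → Bool) (f : String → String) (l : List String) (s : PySem.Set String) :
    (l.foldl (fun (acc : PySem.Set String × List String) k =>
      if p k = true then
        if acc.1.contains (f k) then acc else (PySem.Set.add acc.1 (f k), acc.2 ++ [f k])
      else acc) (s, s))
    = (PySem.Set.update s ((l.filter p).map f), PySem.Set.update s ((l.filter p).map f)) := by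
  induction l generalizing s with
  | nil => rfl
  | cons k l ih =>
    simp only [List.foldl_cons]
    by_cases hp : p k = true
    · rw [if_pos hp]
      have hstep : (if PySem.Set.contains (s, s).1 (f k) = true then ((s, s) : PySem.Set String × List String)
            else (PySem.Set.add (s, s).1 (f k), (s, s).2 ++ [f k]))
          = (PySem.Set.add s (f k), PySem.Set.add s (f k)) := by
        by_cases hm : f k ∈ s <;> simp [PySem.Set.add, hm]
      rw [hstep, ih (PySem.Set.add s (f k))]
      simp [hp, PySem.Set.update]
    · rw [if_neg hp, ih s]
      simp [hp]

-- B's dedup loop: same loop without the match test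
theorem pv_foldl_dedup (l : List String) (s : PySem.Set String) :
    (l.foldl (fun (acc : PySem.Set String × List String) v =>
      if acc.1.contains v = true then acc else (PySem.Set.add acc.1 v, acc.2 ++ [v])) (s, s))
    = (PySem.Set.update s l, PySem.Set.update s l) := by
  have h := pv_foldl_seen (fun _ => true) id l s
  simpa using h

-- insertBy through a map whose comparator factors through the map
theorem pv_insertBy_map {α β : Type} (f : α → β) (bef : β → β → Bool) (x : α) (ys : List α) :
    PySem.List.insertBy bef (f x) (ys.map f)
      = (PySem.List.insertBy (fun a b => bef (f a) (f b)) x ys).map f := by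
  induction ys with
  | nil => rfl
  | cons y ys ih =>
    by_cases h : bef (f x) (f y) = true
    · simp [PySem.List.insertBy, h]
    · simp [PySem.List.insertBy, h, ih]

-- stable sort (reverse, by key) commutes with map when the key factors through the map
theorem pv_sorted_map_rev {α β κ : Type} [LT κ] [DecidableLT κ] (f : α → β) (key : β → κ) (l : List α) :
    PySem.List.sorted (l.map f) key true
      = (PySem.List.sorted l (fun a => key (f a)) true).map f := by
  rw [PySem.List.sorted_rev_eq_foldl_insertBy, PySem.List.sorted_rev_eq_foldl_insertBy, List.foldl_map]
  suffices h : ∀ (l : List α) (acc : List α),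
      l.foldl (fun acc2 a => PySem.List.insertBy (fun b1 b2 => decide (key b2 < key b1)) (f a) acc2) (acc.map f)
      = (l.foldl (fun acc2 a => PySem.List.insertBy (fun a1 a2 => decide (key (f a2) < key (f a1))) a acc2) acc).map f by
    simpa using h l []
  intro l
  induction l with
  | nil => intro acc; rfl
  | cons a l ih =>
    intro acc
    simp only [List.foldl_cons]
    rw [pv_insertBy_map f (fun b1 b2 => decide (key b2 < key b1)) a acc, ih]

-- insertBy of a dropped element disappears under filter
theorem pv_filter_insertBy_neg {α : Type} (p : α → Bool) (bef : α → α → Bool) (x : α) (ys : List α)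
    (hx : p x = false) :
    (PySem.List.insertBy bef x ys).filter p = ys.filter p := by
  induction ys with
  | nil => simp [PySem.List.insertBy, hx]
  | cons y ys ih =>
    by_cases h : bef x y = true
    · simp [PySem.List.insertBy, h, hx]
    · by_cases hy : p y = true <;> simp [PySem.List.insertBy, h, hy, ih]

-- inserting into a descending-sorted list commutes with filter (this IS stability)
theorem pv_filter_insertBy_pos {α κ : Type} [LinearOrder κ] (key : α → κ) (p : α → Bool) (x : α)
    (ys : List α) (hx : p x = true) (hsort : ys.Pairwise (fun a b => key b ≤ key a)) :
    (PySem.List.insertBy (fun a b => decide (key b < key a)) x ys).filter p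
      = PySem.List.insertBy (fun a b => decide (key b < key a)) x (ys.filter p) := by
  induction ys with
  | nil => simp [PySem.List.insertBy, hx]
  | cons y ys ih =>
    rcases List.pairwise_cons.mp hsort with ⟨hy, hys⟩
    by_cases h : key y < key x
    · by_cases hpy : p y = true
      · simp [PySem.List.insertBy, h, hx, hpy]
      · have hfront : ∀ z ∈ ys.filter p, key z < key x := by
          intro z hz
          exact lt_of_le_of_lt (hy z (List.mem_of_mem_filter hz)) h
        simp only [PySem.List.insertBy, h, decide_true, if_true, List.filter_cons, hpy,
          Bool.false_eq_true, if_false, hx, if_true]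
        cases hzs : ys.filter p with
        | nil => rfl
        | cons z zs =>
          have : key z < key x := hfront z (by rw [hzs]; exact List.mem_cons_self)
          simp [PySem.List.insertBy, this]
    · by_cases hpy : p y = true
      · simp [PySem.List.insertBy, h, hpy, ih hys]
      · simp [PySem.List.insertBy, h, hpy, ih hys]

-- insertBy with the descending comparator preserves descending order
theorem pv_pairwise_insertBy {α κ : Type} [LinearOrder κ] (key : α → κ) (x : α) (ys : List α)
    (h : ys.Pairwise (fun a b => key b ≤ key a)) :
    (PySem.List.insertBy (fun a b => decide (key b < key a)) x ys).Pairwise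
      (fun a b => key b ≤ key a) := by
  induction ys with
  | nil => simp [PySem.List.insertBy]
  | cons y ys ih =>
    rcases List.pairwise_cons.mp h with ⟨hy, hys⟩
    by_cases hlt : key y < key x
    · have : ∀ z ∈ y :: ys, key z ≤ key x := by
        intro z hz
        rcases List.mem_cons.mp hz with rfl | hz
        · exact le_of_lt hlt
        · exact le_trans (hy z hz) (le_of_lt hlt)
      simpa [PySem.List.insertBy, hlt] using List.pairwise_cons.mpr ⟨this, h⟩
    · have hhead : ∀ z ∈ PySem.List.insertBy (fun a b => decide (key b < key a)) x ys, key z ≤ key y := by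
        intro z hz
        rcases (PySem.List.mem_insertBy _ _ _ _).mp hz with rfl | hz
        · exact not_lt.mp hlt
        · exact hy z hz
      simp only [PySem.List.insertBy, hlt, decide_false, Bool.false_eq_true, if_false]
      exact List.pairwise_cons.mpr ⟨hhead, ih hys⟩

-- stable reverse sort commutes with filter
theorem pv_sorted_filter_rev {α κ : Type} [LinearOrder κ] (key : α → κ) (p : α → Bool) (l : List α) :
    (PySem.List.sorted l key true).filter p = PySem.List.sorted (l.filter p) key true := by
  rw [PySem.List.sorted_rev_eq_foldl_insertBy, PySem.List.sorted_rev_eq_foldl_insertBy]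
  suffices h : ∀ (l : List α) (acc : List α), acc.Pairwise (fun a b => key b ≤ key a) →
      (l.foldl (fun acc2 a => PySem.List.insertBy (fun a1 a2 => decide (key a2 < key a1)) a acc2) acc).filter p
      = (l.filter p).foldl (fun acc2 a => PySem.List.insertBy (fun a1 a2 => decide (key a2 < key a1)) a acc2) (acc.filter p) by
    simpa using h l [] (by simp)
  intro l
  induction l with
  | nil => intro acc _; rfl
  | cons a l ih =>
    intro acc hacc
    have hstep : (PySem.List.insertBy (fun a1 a2 => decide (key a2 < key a1)) a acc).Pairwise
        (fun a b => key b ≤ key a) := pv_pairwise_insertBy key a acc hacc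
    by_cases hp : p a = true
    · simp only [List.foldl_cons, List.filter_cons, hp, if_true]
      rw [ih _ hstep, pv_filter_insertBy_pos key p a acc hp hacc]
    · simp only [List.foldl_cons, List.filter_cons, hp]
      rw [ih _ hstep, pv_filter_insertBy_neg p _ a acc (by simpa using hp)]
      simp

-- A reduces to the normal form
theorem pv_A_norm (text : String) (inv_index : List (String × String)) :
    extract_by_lexicon text inv_index = pvN (pvNorm text) inv_index := by
  have hnd : (PySem.Dict.ofList inv_index).keys.Nodup := PySem.Dict.nodup_keys_ofList inv_index
  unfold extract_by_lexicon pvN pvNorm pvP pvKeyLen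
  simp only []
  generalize PySem.Str.join " " (PySem.Str.split₀ (PySem.Str.strip (PySem.Str.lower text))) = t
  generalize hD : PySem.Dict.ofList inv_index = d
  rw [hD] at hnd
  have h1 := pv_foldl_seen (fun k => !(k == "") && PySem.Str.isIn k t)
    (fun k => d.getD k "") (PySem.List.sorted d.keys (fun k => PySem.Str.len k) true) PySem.Set.empty
  simp only [PySem.Set.empty] at h1 ⊢
  rw [h1]
  have hitems := PySem.Dict.items_eq_map_keys d hnd ""
  have hfilter : d.items.filter (fun kv => !(kv.1 == "") && PySem.Str.isIn kv.1 t)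
      = (d.keys.filter (fun k => !(k == "") && PySem.Str.isIn k t)).map (fun k => (k, d.getD k "")) := by
    rw [hitems, List.filter_map]
    rfl
  rw [hfilter, pv_sorted_map_rev (fun k => (k, d.getD k "")) (fun kv => PySem.Str.len kv.1),
      ← pv_sorted_filter_rev (fun k => PySem.Str.len k) (fun k => !(k == "") && PySem.Str.isIn k t) d.keys,
      List.map_map]
  rfl

-- a loop that skips on p is a loop over the complement filter
theorem pv_foldl_skip {α β : Type} (p : α → Bool) (f : β → α → β) (l : List α) (init : β) :
    l.foldl (fun acc x => if p x = true then acc else f acc x) init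
      = (l.filter (fun x => !p x)).foldl f init := by
  induction l generalizing init with
  | nil => rfl
  | cons x l ih =>
    by_cases h : p x = true <;> simp [h, ih]

-- B's inner loop: the match test factors out of the dedup step
theorem pv_inner_split (q : (String × String) → Bool) (l : List (String × String)) :
    ∀ (acc : PySem.Set String × List String),
    l.foldl (fun (acc : PySem.Set String × List String) kv =>
        if (q kv && !acc.1.contains kv.2) = true
        then (PySem.Set.add acc.1 kv.2, acc.2 ++ [kv.2]) else acc) acc
      = (l.filter q).foldl (fun (acc : PySem.Set String × List String) kv =>
        if acc.1.contains kv.2 = true then acc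
        else (PySem.Set.add acc.1 kv.2, acc.2 ++ [kv.2])) acc := by
  induction l with
  | nil => intro acc; rfl
  | cons kv l ih =>
    intro acc
    simp only [List.foldl_cons, List.filter_cons]
    by_cases hq : q kv = true
    · simp only [hq, Bool.true_and, if_true, List.foldl_cons]
      by_cases hc : acc.1.contains kv.2 = true
      · simp only [hc, Bool.not_true, Bool.false_eq_true, if_false, if_true]
        exact ih acc
      · have hc' : acc.1.contains kv.2 = false := by simpa using hc
        simp only [hc', Bool.not_false, if_true, Bool.false_eq_true, if_false]
        exact ih _
    · have hq' : q kv = false := by simpa using hq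
      simp only [hq', Bool.false_and, Bool.false_eq_true, if_false]
      exact ih acc

-- a descending list splits as (elements with the maximal key) ++ (the rest)
theorem pv_desc_prefix {α : Type} (key : α → Int) (L : Int) :
    ∀ (xs : List α), xs.Pairwise (fun a b => key b ≤ key a) → (∀ x ∈ xs, key x ≤ L) →
    xs.filter (fun x => key x == L) ++ xs.filter (fun x => !(key x == L)) = xs := by
  intro xs
  induction xs with
  | nil => intro _ _; rfl
  | cons x xs ih =>
    intro hpw hle
    rcases List.pairwise_cons.mp hpw with ⟨hx, hxs⟩
    by_cases h : key x = L
    · have : (key x == L) = true := by simp [h]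
      simp only [List.filter_cons, this, Bool.not_true, Bool.false_eq_true, if_false, if_true,
        List.cons_append]
      exact congrArg (x :: ·) (ih hxs (fun y hy => hle y (List.mem_cons_of_mem x hy)))
    · have hxlt : key x < L := lt_of_le_of_ne (hle x List.mem_cons_self) h
      have hall : ∀ y ∈ x :: xs, ¬ key y = L := by
        intro y hy
        rcases List.mem_cons.mp hy with rfl | hy
        · exact h
        · exact ne_of_lt (lt_of_le_of_lt (hx y hy) hxlt)
      have h1 : (x :: xs).filter (fun x => key x == L) = [] := by
        rw [List.filter_eq_nil_iff]
        intro y hy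
        simp [hall y hy]
      have h2 : (x :: xs).filter (fun x => !(key x == L)) = x :: xs := by
        rw [List.filter_eq_self]
        intro y hy
        simp [hall y hy]
      rw [h1, h2, List.nil_append]

-- a descending list is the concatenation of its key-classes, taken in descending key order
theorem pv_desc_flatMap {α : Type} (key : α → Int) :
    ∀ (Ls : List Int) (xs : List α), xs.Pairwise (fun a b => key b ≤ key a) →
    Ls.Pairwise (fun a b => b < a) → (∀ x ∈ xs, key x ∈ Ls) →
    Ls.flatMap (fun L => xs.filter (fun x => key x == L)) = xs := by
  intro Ls
  induction Ls with
  | nil =>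
    intro xs _ _ hmem
    cases xs with
    | nil => rfl
    | cons x xs => exact absurd (hmem x List.mem_cons_self) (List.not_mem_nil)
  | cons L Ls ih =>
    intro xs hxs hLs hmem
    rcases List.pairwise_cons.mp hLs with ⟨hLmax, hLs'⟩
    have hle : ∀ x ∈ xs, key x ≤ L := by
      intro x hx
      rcases List.mem_cons.mp (hmem x hx) with h | h
      · exact le_of_eq h
      · exact le_of_lt (hLmax _ h)
    have hsplit := pv_desc_prefix key L xs hxs hle
    set ys := xs.filter (fun x => !(key x == L)) with hys
    have hflt : ∀ L' ∈ Ls, xs.filter (fun x => key x == L') = ys.filter (fun x => key x == L') := by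
      intro L' hL'
      have hne : L' ≠ L := ne_of_lt (hLmax _ hL')
      rw [hys, List.filter_filter]
      apply List.filter_congr
      intro x _
      by_cases h : key x = L'
      · simp [h, hne]
      · simp [h]
    have htail : Ls.flatMap (fun L => xs.filter (fun x => key x == L))
        = Ls.flatMap (fun L => ys.filter (fun x => key x == L)) := by
      apply List.flatMap_congr
      intro L' hL'
      exact hflt L' hL'
    have hys_pw : ys.Pairwise (fun a b => key b ≤ key a) := hxs.filter _
    have hys_mem : ∀ y ∈ ys, key y ∈ Ls := by
      intro y hy
      have hyx : y ∈ xs := List.mem_of_mem_filter hy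
      have hne : ¬ (key y == L) = true := by
        have := List.of_mem_filter hy
        simpa using this
      rcases List.mem_cons.mp (hmem y hyx) with h | h
      · exact absurd (by simp [h]) hne
      · exact h
    rw [List.flatMap_cons, htail, ih ys hys_pw hLs' hys_mem]
    exact hsplit

-- the length-L substring set of t contains k  ↔  k occurs in t   (for a nonempty k of length L)
theorem pv_subs (t k : String) (L : Int) (hL : PySem.Str.len k = L) (hk : k.toList ≠ []) :
    PySem.Set.contains (PySem.Set.ofList ((PySem.List.pyRange 0 (PySem.Str.len t - L + 1)).map
        (fun i => PySem.Str.slice t (some i) (some (i + L))))) k = PySem.Str.isIn k t := by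
  have hm : L = (k.toList.length : Int) := by rw [← hL, PySem.Str.len_eq]
  have hlenT : PySem.Str.len t = (t.toList.length : Int) := PySem.Str.len_eq t
  have hm1 : 1 ≤ k.toList.length := by
    cases hkl : k.toList with
    | nil => exact absurd hkl hk
    | cons a l => simp
  rw [Bool.eq_iff_iff, PySem.Set.contains_iff, PySem.Set.mem_ofList, List.mem_map]
  rw [show PySem.Str.isIn k t = PySem.Chars.isIn k.toList t.toList from PySem.Str.isIn_eq k t,
      ← PySem.Chars.exists_prefix_drop_iff_isIn]
  constructor
  · rintro ⟨i, hiR, hieq⟩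
    rcases PySem.List.mem_pyRange_one.mp hiR with ⟨hi0, hiU⟩
    refine ⟨i.toNat, ?_⟩
    have htl : (PySem.Str.slice t (some i) (some (i + L))).toList
        = (t.toList.drop i.toNat).take ((i + L).toNat - i.toNat) := by
      rw [PySem.Str.toList_slice, PySem.Chars.slice_eq_listSlice,
        PySem.List.slice_toNat _ hi0 (by omega : (0:Int) ≤ i + L)]
    have hsub : ((i + L).toNat - i.toNat) = k.toList.length := by omega
    have : (t.toList.drop i.toNat).take k.toList.length = k.toList := by
      rw [← hsub, ← htl, hieq]
    rw [List.prefix_iff_eq_take]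
    exact this.symm
  · rintro ⟨j, hpre⟩
    have hjlen : k.toList.length ≤ (t.toList.drop j).length := hpre.length_le
    rw [List.length_drop] at hjlen
    refine ⟨(j : Int), PySem.List.mem_pyRange_one.mpr ⟨by positivity, by omega⟩, ?_⟩
    apply String.toList_inj.mp
    rw [PySem.Str.toList_slice, PySem.Chars.slice_eq_listSlice,
      PySem.List.slice_toNat _ (by positivity) (by omega : (0:Int) ≤ (j:Int) + L)]
    have hsub : (((j:Int) + L).toNat - (j:Int).toNat) = k.toList.length := by omega
    rw [hsub, Int.toNat_natCast]
    exact (List.prefix_iff_eq_take.mp hpre).symm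

-- B reduces to the normal form
-- the dedup loop over pairs only reads the canonical component
theorem pv_fold_snd (l : List (String × String)) (acc : PySem.Set String × List String) :
    l.foldl (fun (acc : PySem.Set String × List String) kv =>
        if acc.1.contains kv.2 = true then acc
        else (PySem.Set.add acc.1 kv.2, acc.2 ++ [kv.2])) acc
      = (l.map (·.2)).foldl (fun (acc : PySem.Set String × List String) v =>
        if acc.1.contains v = true then acc
        else (PySem.Set.add acc.1 v, acc.2 ++ [v])) acc := by
  rw [List.foldl_map]

set_option maxHeartbeats 2000000 in
theorem pv_B_norm (text : String) (inv_index : List (String × String)) :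
    extract_by_lexicon_alt text inv_index = pvN (pvNorm text) inv_index := by
  unfold extract_by_lexicon_alt pvN pvNorm pvP pvKeyLen
  simp only []
  generalize PySem.Str.join " " (PySem.Str.split₀ (PySem.Str.strip (PySem.Str.lower text))) = t
  generalize hD : PySem.Dict.ofList inv_index = d
  rw [pv_foldl_skip (fun kv => kv.1 == "") _ d.items _]
  set F := d.items.filter (fun kv => !(kv.1 == "")) with hF
  have hbl : F.foldl (fun bl kv => bl.modify (PySem.Str.len kv.1) [] (· ++ [kv])) PySem.Dict.empty
      = (F.map (fun kv => ((PySem.Str.len kv.1 : Int), kv))).foldl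
          (fun bl p => bl.modify p.1 [] (· ++ [p.2])) PySem.Dict.empty := by
    rw [List.foldl_map]
  have hbucket : ∀ L : Int,
      (F.foldl (fun bl kv => bl.modify (PySem.Str.len kv.1) [] (· ++ [kv])) PySem.Dict.empty).getD L []
      = F.filter (fun kv => PySem.Str.len kv.1 == L) := by
    intro L
    rw [hbl, PySem.Dict.getD_foldl_modify_append, List.filter_map, List.map_map]
    simp [PySem.Dict.getD_empty, Function.comp_def]
  have hkeys : (F.foldl (fun bl kv => bl.modify (PySem.Str.len kv.1) [] (· ++ [kv])) PySem.Dict.empty).keys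
      = PySem.Set.ofList (F.map (fun kv => (PySem.Str.len kv.1 : Int))) := by
    rw [PySem.Dict.keys_foldl_modify_key F (fun kv => (PySem.Str.len kv.1 : Int)) []
        (fun _ kv => (· ++ [kv])) PySem.Dict.empty]
    simp [PySem.Dict.keys_empty, PySem.Set.update, PySem.Set.ofList_eq_foldl]
  rw [hkeys]
  set Ls := PySem.List.sorted (PySem.Set.ofList (F.map (fun kv => PySem.Str.len kv.1))) (fun L => L) true with hLs
  set hits := d.items.filter (fun kv => !(kv.1 == "") && PySem.Str.isIn kv.1 t) with hhits
  have houter : ∀ (acc : PySem.Set String × List String), ∀ L ∈ Ls,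
      ((F.foldl (fun bl kv => bl.modify (PySem.Str.len kv.1) [] (· ++ [kv])) PySem.Dict.empty).getD L []).foldl
        (fun (acc : PySem.Set String × List String) kv =>
          if ((PySem.Set.ofList ((PySem.List.pyRange 0 (PySem.Str.len t - L + 1)).map
                (fun i => PySem.Str.slice t (some i) (some (i + L))))).contains kv.1
              && !acc.1.contains kv.2) = true
          then (PySem.Set.add acc.1 kv.2, acc.2 ++ [kv.2]) else acc) acc
      = (hits.filter (fun kv => PySem.Str.len kv.1 == L)).foldl
        (fun (acc : PySem.Set String × List String) kv =>
          if acc.1.contains kv.2 = true then acc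
          else (PySem.Set.add acc.1 kv.2, acc.2 ++ [kv.2])) acc := by
    intro acc L _
    rw [hbucket L]
    rw [PySem.List.foldl_congr_mem (F.filter (fun kv => PySem.Str.len kv.1 == L)) _
      (fun (acc : PySem.Set String × List String) kv =>
        if (PySem.Str.isIn kv.1 t && !acc.1.contains kv.2) = true
        then (PySem.Set.add acc.1 kv.2, acc.2 ++ [kv.2]) else acc) acc ?_]
    · rw [pv_inner_split]
      congr 1
      rw [hF, hhits]
      simp only [List.filter_filter]
      apply List.filter_congr
      intro kv _
      cases h1 : (kv.1 == "") <;> cases h2 : PySem.Str.isIn kv.1 t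
        <;> cases h3 : (PySem.Str.len kv.1 == L) <;> simp_all
    · intro acc2 kv hkv
      have hL' : PySem.Str.len kv.1 = L := by simpa using List.of_mem_filter hkv
      have hne : (kv.1 == "") = false := by
        simpa using List.of_mem_filter (List.mem_of_mem_filter hkv)
      have htl : kv.1.toList ≠ [] := by
        intro h
        have he : kv.1 = "" := by
          apply String.toList_inj.mp
          simp [h]
        rw [he] at hne
        simp at hne
      rw [pv_subs t kv.1 L hL' htl]
  rw [PySem.List.foldl_congr_mem Ls _ _ _ houter, ← List.foldl_flatMap]
  have hgroup : Ls.flatMap (fun L => hits.filter (fun kv => PySem.Str.len kv.1 == L))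
      = PySem.List.sorted hits (fun kv => PySem.Str.len kv.1) true := by
    have hxs_pw : (PySem.List.sorted hits (fun kv => PySem.Str.len kv.1) true).Pairwise
        (fun a b => PySem.Str.len b.1 ≤ PySem.Str.len a.1) :=
      PySem.List.sorted_pairwise_rev hits (fun kv => PySem.Str.len kv.1)
    have h1 : ∀ L, hits.filter (fun kv => PySem.Str.len kv.1 == L)
        = (PySem.List.sorted hits (fun kv => PySem.Str.len kv.1) true).filter
            (fun kv => PySem.Str.len kv.1 == L) := by
      intro L
      rw [pv_sorted_filter_rev]
      refine (PySem.List.sorted_rev_eq_self_of_pairwise _ _ ?_).symm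
      apply List.pairwise_of_forall_mem_list
      intro a ha b hb
      have ha' : PySem.Str.len a.1 = L := by simpa using List.of_mem_filter ha
      have hb' : PySem.Str.len b.1 = L := by simpa using List.of_mem_filter hb
      rw [ha', hb']
    have hLs_desc : Ls.Pairwise (fun a b => b < a) := by
      have ha : Ls.Pairwise (fun a b => b ≤ a) :=
        PySem.List.sorted_pairwise_rev (PySem.Set.ofList (F.map (fun kv => PySem.Str.len kv.1))) (fun L => L)
      have hnd : Ls.Nodup :=
        (PySem.List.sorted_perm _ _ _).nodup_iff.mpr (PySem.Set.nodup_ofList _)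
      exact (ha.and hnd).imp (fun h => lt_of_le_of_ne h.1 (Ne.symm h.2))
    have hmem : ∀ x ∈ PySem.List.sorted hits (fun kv => PySem.Str.len kv.1) true,
        PySem.Str.len x.1 ∈ Ls := by
      intro x hx
      have hxh : x ∈ hits := (PySem.List.mem_sorted _ _ _ _).mp hx
      rw [hhits, List.mem_filter] at hxh
      obtain ⟨hxd, hxp⟩ := hxh
      have hxne : (!(x.1 == "")) = true := ((Bool.and_eq_true _ _).mp hxp).1
      have hxF : x ∈ F := by
        rw [hF]
        exact List.mem_filter.mpr ⟨hxd, hxne⟩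
      rw [hLs]
      exact (PySem.List.mem_sorted _ _ _ _).mpr
        ((PySem.Set.mem_ofList _ _).mpr (List.mem_map.mpr ⟨x, hxF, rfl⟩))
    rw [List.flatMap_congr (fun L _ => h1 L)]
    exact pv_desc_flatMap (fun kv : String × String => PySem.Str.len kv.1) Ls _ hxs_pw hLs_desc hmem
  rw [hgroup, pv_fold_snd]
  simp only [PySem.Set.empty]
  rw [pv_foldl_dedup]

theorem pv_main (text : String) (inv_index : List (String × String)) :
    extract_by_lexicon text inv_index = extract_by_lexicon_alt text inv_index := by
  rw [pv_A_norm, pv_B_norm]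

-- ===== VERDICT (by name: the statement is the Claim_ definition above) =====
theorem extract_by_lexicon_spec : Claim_equal_extract_by_lexicon := by
  intro text inv_index _
  exact pv_main text inv_index
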